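-- pv_equiv track=rewrite | github.com/VeganPorkChop/CS-Assignments | CS-150/Lab3/report.py | listings_per_host_with_type
-- ===== SOURCE A (Python) =====
-- IDX_HOST_ID = 2
--
-- IDX_ROOM_TYPE = 8
--
-- def listings_per_host_with_type(data: list[list[str]], room_type: str = "") -> dict[str, int]:
--     """Creates a dictionary mapping host ids to listing counts for that host
--
--     In other words, returns the number of listings per host
--
--     The room type is an optional parameter to filter listings (similar to get_prices):
--     * If room type is empty, consider all listings
--     * If room type is non-empty (e.g. "Entire home/apt"),
--         then consider only listings with that room type
--
--     If a host has no listings of the given room type,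
--         then the dictionary contains that host id mapping to 0
--         rather than skipping the host id entirely
--
--     Arguments:
--       data: an Inside Airbnb dataset
--       room_type: the type of room to filter
--
--     Returns:
--       A dictionary where the keys are strings denoting host ids
--         and the values are integers denoting each host's listing count
--     """
--     host_counts = {}
--     for row in data:
--         host_id = row[IDX_HOST_ID]
--         if host_id not in host_counts:
--             host_counts[host_id] = 0
--         if room_type == "" or row[IDX_ROOM_TYPE] == room_type:
--             host_counts[host_id] += 1
--
--     return host_counts
-- ===== SOURCE B (Python) =====
-- IDX_HOST_ID = 2
-- IDX_ROOM_TYPE = 8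
--
-- def listings_per_host_with_type(data: list[list[str]], room_type: str = "") -> dict[str, int]:
--     # Stage 1: collect the distinct host ids in first-occurrence order.
--     hosts = []
--     for row in data:
--         h = row[IDX_HOST_ID]
--         if h not in hosts:
--             hosts.append(h)
--     # Stage 2: for each host, count its matching listings by a direct scan over data.
--     return {h: sum(1 for row in data
--                    if row[IDX_HOST_ID] == h
--                    and (room_type == "" or row[IDX_ROOM_TYPE] == room_type))
--             for h in hosts}
-- ===== Notes on version B (the rewrite author's own statement) =====
-- stated objective: alternative
-- what changed: A maintains a dict counter updated in one pass; B keeps no counter at all: it first extracts the distinct host ids in first-occurrence order, then computes each host's count independently by a nested scan over the data (group-by-then-count, O(h*n) instead of O(n)).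
import Mathlib
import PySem

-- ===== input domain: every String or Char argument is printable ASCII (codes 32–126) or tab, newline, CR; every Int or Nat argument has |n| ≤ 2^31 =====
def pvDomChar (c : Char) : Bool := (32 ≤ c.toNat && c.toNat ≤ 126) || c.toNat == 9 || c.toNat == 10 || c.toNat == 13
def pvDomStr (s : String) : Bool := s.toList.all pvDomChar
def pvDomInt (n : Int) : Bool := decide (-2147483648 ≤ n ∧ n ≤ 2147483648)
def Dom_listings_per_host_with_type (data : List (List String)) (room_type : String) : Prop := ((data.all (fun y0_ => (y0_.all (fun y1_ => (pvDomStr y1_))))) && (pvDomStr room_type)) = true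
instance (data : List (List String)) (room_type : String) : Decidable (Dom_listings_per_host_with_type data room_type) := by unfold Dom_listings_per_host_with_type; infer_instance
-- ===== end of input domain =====

-- A maintains one dict counter in a single pass; B keeps no counter: it collects the distinct host ids first and then counts each host's matching listings by its own scan over the data (objective: alternative, group-by-then-count).

-- shared field accessors (row[IDX_HOST_ID], the room-type filter test)
def pvHost (row : List String) : String := (PySem.List.pyGet? row 2).getD ""
def pvMatch (room_type : String) (row : List String) : Bool :=
  room_type == "" || (PySem.List.pyGet? row 8).getD "" == room_type

-- ===== PORT A =====
-- loop body of A: ensure key exists, then increment if the row passes the filter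
def pvStepA (room_type : String) (host_counts : PySem.Dict String Int) (row : List String) : PySem.Dict String Int :=
  let host_id := pvHost row
  let host_counts := if host_counts.contains host_id then host_counts else host_counts.insert host_id 0
  if pvMatch room_type row then host_counts.modify host_id 0 (· + 1) else host_counts

def listings_per_host_with_type (data : List (List String)) (room_type : String) : List (String × Int) :=
  (data.foldl (pvStepA room_type) (PySem.Dict.empty : PySem.Dict String Int)).items

-- ===== PORT B =====
def listings_per_host_with_type_alt (data : List (List String)) (room_type : String) : List (String × Int) :=
  -- stage 1: distinct host ids in first-occurrence order ('if h not in hosts: hosts.append(h)')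
  let hosts : List String := data.foldl
    (fun hs row => if hs.contains (pvHost row) then hs else hs ++ [pvHost row]) []
  -- stage 2: per-host count by a direct scan over data (the sum(1 for row in data if …) comprehension)
  hosts.map (fun h => (h,
    ((data.filter (fun row => pvHost row == h && pvMatch room_type row)).length : Int)))

-- ===== PRECONDITION & SPEC =====
-- Pre_ excludes exactly the inputs where the Python A raises IndexError: a row shorter
-- than 3 (row[2]), or, with a non-empty room_type filter, shorter than 9 (row[8]).
def Pre_listings_per_host_with_type (data : List (List String)) (room_type : String) : Prop :=
  ∀ row ∈ data, 3 ≤ row.length ∧ (room_type ≠ "" → 9 ≤ row.length)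
instance (data : List (List String)) (room_type : String) : Decidable (Pre_listings_per_host_with_type data room_type) := by unfold Pre_listings_per_host_with_type; infer_instance

def pvWitness_listings_per_host_with_type : List (List String) × String :=
  ([["0", "1", "h1", "3", "4", "5", "6", "7", "Entire home/apt"],
    ["0", "1", "h2", "3", "4", "5", "6", "7", "Private room"],
    ["0", "1", "h1", "3", "4", "5", "6", "7", "Private room"]], "Private room")

def Spec_listings_per_host_with_type (data : List (List String)) (room_type : String) (out : List (String × Int)) : Prop := out = listings_per_host_with_type_alt data room_type
instance (data : List (List String)) (room_type : String) (out : List (String × Int)) : Decidable (Spec_listings_per_host_with_type data room_type out) := by unfold Spec_listings_per_host_with_type; infer_instance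

-- ===== CLAIM (what is proved, stated in full; the proofs are below) =====
def Claim_equal_listings_per_host_with_type : Prop := ∀ (data : List (List String)) (room_type : String), Dom_listings_per_host_with_type data room_type → Pre_listings_per_host_with_type data room_type → Spec_listings_per_host_with_type data room_type (listings_per_host_with_type data room_type)

-- ===== LEMMAS AND PROOFS =====

-- Set.add leaves a set unchanged when the element is already in it
lemma pvSet_add_of_mem (s : PySem.Set String) (x : String) (h : x ∈ s) : PySem.Set.add s x = s := by
  simp [PySem.Set.add, PySem.Set.contains, h]

-- Nodup is preserved by Set.add
lemma pvSet_nodup_add (s : PySem.Set String) (x : String) (h : s.Nodup) : (PySem.Set.add s x).Nodup := by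
  by_cases hx : x ∈ s
  · rw [pvSet_add_of_mem s x hx]; exact h
  · simp only [PySem.Set.add, PySem.Set.contains, List.contains_eq_mem, hx, decide_false,
      Bool.false_eq_true, ite_false]
    simp only [List.nodup_append, h, List.nodup_cons, List.not_mem_nil, not_false_iff, List.nodup_nil, and_true, true_and]
    intro a ha b hb
    rw [List.mem_singleton] at hb
    subst hb
    exact fun h => hx (h ▸ ha)

-- the keys after one A-step
lemma pvStepA_keys (rt : String) (d : PySem.Dict String Int) (r : List String) :
    (pvStepA rt d r).keys = PySem.Set.add d.keys (pvHost r) := by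
  unfold pvStepA
  have hbase : (if d.contains (pvHost r) then d else d.insert (pvHost r) 0).keys = PySem.Set.add d.keys (pvHost r) := by
    by_cases hc : d.contains (pvHost r)
    · simp only [hc, ite_true]
      exact (pvSet_add_of_mem _ _ ((PySem.Dict.contains_iff_mem_keys d _).mp hc)).symm
    · simp only [hc, Bool.false_eq_true, ite_false]
      rw [PySem.Dict.keys_insert_of_not_contains d _ (by simpa using hc)]
      have hnm : pvHost r ∉ d.keys := fun h => hc ((PySem.Dict.contains_iff_mem_keys d _).mpr h)
      simp [PySem.Set.add, PySem.Set.contains, hnm]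
  by_cases hm : pvMatch rt r
  · simp only [hm, ite_true]
    rw [PySem.Dict.keys_modify]
    rw [PySem.Dict.keys_insert_of_contains _ _ ?_, hbase]
    by_cases hc : d.contains (pvHost r)
    · simpa [hc] using hc
    · simp only [hc, Bool.false_eq_true, ite_false]
      exact PySem.Dict.contains_insert_self d _ 0
  · simp only [hm, Bool.false_eq_true, ite_false]
    exact hbase

-- the value at k after one A-step
lemma pvStepA_getD (rt : String) (d : PySem.Dict String Int) (r : List String) (k : String) :
    (pvStepA rt d r).getD k 0 =
      d.getD k 0 + (if pvMatch rt r ∧ k = pvHost r then 1 else 0) := by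
  unfold pvStepA
  have hbase : ∀ k', (if d.contains (pvHost r) then d else d.insert (pvHost r) 0).getD k' 0 = d.getD k' 0 := by
    intro k'
    by_cases hc : d.contains (pvHost r)
    · simp [hc]
    · simp only [hc, Bool.false_eq_true, ite_false]
      rw [PySem.Dict.getD_insert]
      by_cases hk : k' = pvHost r
      · subst hk; simp [PySem.Dict.getD_of_not_contains d 0 (by simpa using hc)]
      · simp [hk]
  by_cases hm : pvMatch rt r
  · simp only [hm, ite_true, true_and]
    rw [PySem.Dict.getD_modify, hbase, hbase]
    by_cases hk : k = pvHost r <;> simp [hk]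
  · simp only [hm, Bool.false_eq_true, ite_false, false_and, add_zero]
    exact hbase k

-- A's whole loop: keys accumulate in first-occurrence order
lemma pvFoldA_keys (rt : String) (data : List (List String)) (d : PySem.Dict String Int) :
    (data.foldl (pvStepA rt) d).keys = PySem.Set.update d.keys (data.map pvHost) := by
  induction data generalizing d with
  | nil => rfl
  | cons r rest ih =>
      show (rest.foldl (pvStepA rt) (pvStepA rt d r)).keys = PySem.Set.update (PySem.Set.add d.keys (pvHost r)) (rest.map pvHost)
      rw [ih, pvStepA_keys]

lemma pvFoldA_nodup (rt : String) (data : List (List String)) (d : PySem.Dict String Int)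
    (h : d.keys.Nodup) : (data.foldl (pvStepA rt) d).keys.Nodup := by
  induction data generalizing d with
  | nil => exact h
  | cons r rest ih =>
      refine ih (pvStepA rt d r) ?_
      rw [pvStepA_keys]; exact pvSet_nodup_add _ _ h

-- A's whole loop: the value at k grows by the number of filtered rows with host k
lemma pvFoldA_getD (rt : String) (data : List (List String)) (d : PySem.Dict String Int) (k : String) :
    (data.foldl (pvStepA rt) d).getD k 0 =
      d.getD k 0 + (((data.filter (pvMatch rt)).map pvHost).count k : Int) := by
  induction data generalizing d with
  | nil => simp
  | cons r rest ih =>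
      show (rest.foldl (pvStepA rt) (pvStepA rt d r)).getD k 0 = _
      rw [ih, pvStepA_getD]
      by_cases hm : pvMatch rt r
      · by_cases hk : k = pvHost r
        · simp [List.filter_cons, hm, hk, List.count_cons]; ring
        · have hk' : ¬ pvHost r = k := fun h => hk h.symm
          simp [List.filter_cons, hm, List.count_cons, hk', hk]
      · simp [List.filter_cons, hm]

-- B's stage-1 fold is Set.update: appending a host iff it is not yet in the list IS Set.add
lemma pvHosts_eq_update (data : List (List String)) (s : List String) :
    data.foldl (fun hs row => if hs.contains (pvHost row) then hs else hs ++ [pvHost row]) s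
      = PySem.Set.update s (data.map pvHost) := by
  induction data generalizing s with
  | nil => rfl
  | cons r rest ih =>
      simp only [List.foldl_cons, List.map_cons, PySem.Set.update] at *
      rw [ih]
      rfl

-- counting a host in the filtered rows equals the length of B's conjunctive filter
lemma pvCount_eq_filter_length (rt : String) (data : List (List String)) (k : String) :
    (((data.filter (pvMatch rt)).map pvHost).count k : Int)
      = ((data.filter (fun row => pvHost row == k && pvMatch rt row)).length : Int) := by
  congr 1
  induction data with
  | nil => rfl
  | cons r rest ih =>
      by_cases hm : pvMatch rt r
      · by_cases hk : pvHost r = k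
        · simp [List.filter_cons, hm, hk, List.count_cons, ih]
        · simp [List.filter_cons, hm, hk, List.count_cons, ih]
      · simp [List.filter_cons, hm, ih]

-- ===== VERDICT (by name: the statement is the Claim_ definition above) =====
theorem listings_per_host_with_type_spec : Claim_equal_listings_per_host_with_type := by
  intro data room_type _ _
  show listings_per_host_with_type data room_type = listings_per_host_with_type_alt data room_type
  unfold listings_per_host_with_type listings_per_host_with_type_alt
  set dA := data.foldl (pvStepA room_type) (PySem.Dict.empty : PySem.Dict String Int) with hdA
  have hAnodup : dA.keys.Nodup := pvFoldA_nodup _ _ _ (by simp)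
  rw [PySem.Dict.items_eq_map_keys dA hAnodup 0]
  rw [pvHosts_eq_update data []]
  have hkeys : dA.keys = PySem.Set.update [] (data.map pvHost) := by
    rw [hdA, pvFoldA_keys]; simp
  rw [← hkeys]
  refine List.map_congr_left (fun k _ => ?_)
  rw [hdA, pvFoldA_getD, pvCount_eq_filter_length]
  simp
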